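-- pv_equiv track=rewrite | github.com/ShreyasKudari/CopSense | main.py | has_intersection
-- ===== SOURCE A (Python) =====
-- def has_intersection(tweet_data, word_dep, keywords):
--     tokens = {}
--     for w,x,y,i in tweet_data:
--         tokens[i] = w
--
--     wd = []
--     for _, a, b in word_dep:
--         wd.append(tokens.get(a-1, ""))
--         wd.append(tokens.get(b-1, ""))
--
--     list_of_kwords = []
--     for i in keywords['documents']:
--         for j in i['keyPhrases']:
--             list_of_kwords += j.split()
--
--
--     wd = set(wd)
--     k = set(list_of_kwords)
--     intersection = wd.intersection(k)
--     if intersection: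
--         return True
--     else:
--         return False
-- ===== SOURCE B (Python) =====
-- def has_intersection(tweet_data, word_dep, keywords):
--     # indices referenced by the dependency pairs
--     idxs = set()
--     for _, a, b in word_dep:
--         idxs.add(a - 1)
--         idxs.add(b - 1)
--     # walk the tweet backwards so the LAST token for each index wins (dict overwrite
--     # semantics); collect the words sitting at referenced indices, no dict needed
--     refwords = set()
--     for w, _x, _y, i in reversed(tweet_data):
--         if i in idxs:
--             refwords.add(w)
--             idxs.remove(i)
--     # scan the keyword words, short-circuiting on the first one that is a referenced word
--     for doc in keywords['documents']:
--         for phrase in doc['keyPhrases']: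
--             for word in phrase.split():
--                 if word in refwords:
--                     return True
--     return False
-- ===== Notes on version B (the rewrite author's own statement) =====
-- stated objective: alternative
-- what changed: Inverts the direction of the test: collects the dependency-referenced indices, walks the tweet once in reverse picking the last token per referenced index (no dict), then scans the keyword words with a short-circuiting membership test against that referenced-word set, instead of materialising both full sets and intersecting them.
import Mathlib
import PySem

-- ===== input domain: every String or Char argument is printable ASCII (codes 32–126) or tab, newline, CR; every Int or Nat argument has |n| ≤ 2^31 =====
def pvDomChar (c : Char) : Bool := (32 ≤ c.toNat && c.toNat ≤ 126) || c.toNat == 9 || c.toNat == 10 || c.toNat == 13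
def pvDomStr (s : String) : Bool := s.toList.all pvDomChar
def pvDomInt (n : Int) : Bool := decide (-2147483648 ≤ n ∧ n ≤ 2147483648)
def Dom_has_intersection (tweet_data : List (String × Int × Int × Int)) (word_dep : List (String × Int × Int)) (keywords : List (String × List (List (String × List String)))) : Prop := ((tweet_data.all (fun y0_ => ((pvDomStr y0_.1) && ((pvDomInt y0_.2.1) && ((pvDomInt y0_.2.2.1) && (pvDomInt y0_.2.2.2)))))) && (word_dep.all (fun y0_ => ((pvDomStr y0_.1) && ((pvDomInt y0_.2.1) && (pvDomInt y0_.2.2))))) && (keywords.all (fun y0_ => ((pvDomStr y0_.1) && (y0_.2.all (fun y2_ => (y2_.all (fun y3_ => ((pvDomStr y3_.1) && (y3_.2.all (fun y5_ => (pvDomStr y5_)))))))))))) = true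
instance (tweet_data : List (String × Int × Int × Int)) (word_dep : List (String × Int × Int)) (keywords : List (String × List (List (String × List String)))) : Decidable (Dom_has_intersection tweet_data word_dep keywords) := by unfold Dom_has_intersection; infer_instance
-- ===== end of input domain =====

-- B inverts the test direction: it collects the dependency-referenced indices, walks the tweet
-- once in reverse picking the last token per referenced index (no dict), then scans the keyword
-- words with a short-circuiting membership test; same cost, a genuinely different traversal.

-- shared helper: Python dict lookup on an association list (first match = d[k] as Option)
def pvLookup {α : Type} (d : List (String × α)) (k : String) : Option α :=
  (d.find? (fun p => p.1 == k)).map (·.2)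

-- ===== PORT A =====
def has_intersection (tweet_data : List (String × Int × Int × Int)) (word_dep : List (String × Int × Int)) (keywords : List (String × List (List (String × List String)))) : Bool :=
  -- tokens = {}; for w,x,y,i in tweet_data: tokens[i] = w
  let tokens := tweet_data.foldl (fun d p => PySem.Dict.insert d p.2.2.2 p.1) PySem.Dict.empty
  -- wd = []; for _, a, b in word_dep: wd.append(tokens.get(a-1,"")); wd.append(tokens.get(b-1,""))
  let wd := word_dep.foldl (fun acc p =>
      (acc ++ [PySem.Dict.getD tokens (p.2.1 - 1) ""]) ++ [PySem.Dict.getD tokens (p.2.2 - 1) ""]) []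
  -- keywords['documents'] — KeyError (excluded by Pre_) modelled by the .getD [] total form
  let docs := (pvLookup keywords "documents").getD []
  -- list_of_kwords = []; for i in docs: for j in i['keyPhrases']: list_of_kwords += j.split()
  let list_of_kwords := docs.foldl (fun acc i =>
      ((pvLookup i "keyPhrases").getD []).foldl (fun a j => a ++ PySem.Str.split₀ j) acc) []
  -- wd = set(wd); k = set(list_of_kwords); intersection = wd.intersection(k); return bool(intersection)
  !(PySem.Set.inter (PySem.Set.ofList wd) (PySem.Set.ofList list_of_kwords)).isEmpty

-- ===== PORT B =====
def has_intersection_alt (tweet_data : List (String × Int × Int × Int)) (word_dep : List (String × Int × Int)) (keywords : List (String × List (List (String × List String)))) : Bool :=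
  -- idxs = set(); for _, a, b in word_dep: idxs.add(a-1); idxs.add(b-1)
  let idxs : PySem.Set Int := word_dep.foldl
      (fun s p => PySem.Set.add (PySem.Set.add s (p.2.1 - 1)) (p.2.2 - 1)) PySem.Set.empty
  -- refwords = set(); for w,_x,_y,i in reversed(tweet_data): if i in idxs: refwords.add(w); idxs.remove(i)
  -- (idxs.remove on a checked member = Set.discard)
  let st := tweet_data.reverse.foldl
      (fun (st : PySem.Set Int × PySem.Set String) p =>
        if PySem.Set.contains st.1 p.2.2.2 then
          (PySem.Set.discard st.1 p.2.2.2, PySem.Set.add st.2 p.1)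
        else st)
      (idxs, PySem.Set.empty)
  -- for doc in keywords['documents']: for phrase in doc['keyPhrases']: for word in phrase.split():
  --   if word in refwords: return True
  -- return False
  ((pvLookup keywords "documents").getD []).any (fun doc =>
    ((pvLookup doc "keyPhrases").getD []).any (fun phrase =>
      (PySem.Str.split₀ phrase).any (fun word => PySem.Set.contains st.2 word)))

-- ===== PRECONDITION & SPEC =====
-- Pre_ excludes exactly the inputs on which A raises KeyError: keywords without a 'documents'
-- key, or a document without a 'keyPhrases' key.
def Pre_has_intersection (_tweet_data : List (String × Int × Int × Int)) (_word_dep : List (String × Int × Int)) (keywords : List (String × List (List (String × List String)))) : Prop :=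
  (pvLookup keywords "documents").isSome = true ∧
  ∀ doc ∈ (pvLookup keywords "documents").getD [], (pvLookup doc "keyPhrases").isSome = true
instance (tweet_data : List (String × Int × Int × Int)) (word_dep : List (String × Int × Int)) (keywords : List (String × List (List (String × List String)))) : Decidable (Pre_has_intersection tweet_data word_dep keywords) := by unfold Pre_has_intersection; infer_instance

def pvWitness_has_intersection : (List (String × Int × Int × Int)) × (List (String × Int × Int)) × (List (String × List (List (String × List String)))) :=
  ([("cop", 0, 0, 1)], [("nsubj", 2, 1)], [("documents", [[("keyPhrases", ["cop car"])]])])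

def Spec_has_intersection (tweet_data : List (String × Int × Int × Int)) (word_dep : List (String × Int × Int)) (keywords : List (String × List (List (String × List String)))) (out : Bool) : Prop := out = has_intersection_alt tweet_data word_dep keywords
instance (tweet_data : List (String × Int × Int × Int)) (word_dep : List (String × Int × Int)) (keywords : List (String × List (List (String × List String)))) (out : Bool) : Decidable (Spec_has_intersection tweet_data word_dep keywords out) := by unfold Spec_has_intersection; infer_instance

-- ===== CLAIM =====
def Claim_equal_has_intersection : Prop := ∀ (tweet_data : List (String × Int × Int × Int)) (word_dep : List (String × Int × Int)) (keywords : List (String × List (List (String × List String)))), Dom_has_intersection tweet_data word_dep keywords → Pre_has_intersection tweet_data word_dep keywords → Spec_has_intersection tweet_data word_dep keywords (has_intersection tweet_data word_dep keywords)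

-- ===== LEMMAS AND PROOFS =====

-- A's inner keyword loop appends splits: it is acc ++ flatMap
theorem pv_foldl_append_split (phr : List String) : ∀ (acc : List String),
    phr.foldl (fun a j => a ++ PySem.Str.split₀ j) acc = acc ++ phr.flatMap PySem.Str.split₀ := by
  induction phr with
  | nil => intro acc; simp
  | cons p t _ih => intro acc; simp [List.foldl, List.append_assoc, List.flatMap]

-- A's full keyword list is a flatMap
theorem pv_kwords_eq (docs : List (List (String × List String))) : ∀ (acc : List String),
    docs.foldl (fun acc i => ((pvLookup i "keyPhrases").getD []).foldl (fun a j => a ++ PySem.Str.split₀ j) acc) acc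
      = acc ++ docs.flatMap (fun i => ((pvLookup i "keyPhrases").getD []).flatMap PySem.Str.split₀) := by
  induction docs with
  | nil => intro acc; simp
  | cons d t ih => intro acc; simp [List.foldl, pv_foldl_append_split, List.append_assoc, List.flatMap]

-- A's wd list is a flatMap of the two looked-up tokens
theorem pv_wd_eq {κ : Type} (g1 g2 : κ → String) (l : List κ) : ∀ (acc : List String),
    l.foldl (fun acc p => (acc ++ [g1 p]) ++ [g2 p]) acc = acc ++ l.flatMap (fun p => [g1 p, g2 p]) := by
  induction l with
  | nil => intro acc; simp
  | cons p t _ih => intro acc; simp [List.foldl, List.append_assoc, List.flatMap]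

-- the token dict's lookup is the first match in the reversed tweet
theorem pv_tokens_get? (td : List (String × Int × Int × Int)) : ∀ (d : PySem.Dict Int String) (i : Int),
    (td.foldl (fun d p => PySem.Dict.insert d p.2.2.2 p.1) d).get? i
      = ((td.reverse.find? (fun p => p.2.2.2 == i)).map (·.1)).or (d.get? i) := by
  induction td with
  | nil => intro d i; simp
  | cons p t ih =>
    intro d i
    simp only [List.foldl, List.reverse_cons, List.find?_append, ih]
    by_cases h : p.2.2.2 = i
    · have hb : (p.2.2.2 == i) = true := by simp [h]
      cases hf : t.reverse.find? (fun p => p.2.2.2 == i) with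
      | some v => simp [hf]
      | none => simp [List.find?, hb, h, PySem.Dict.get?_insert_self]
    · have hb : (p.2.2.2 == i) = false := by simp [h]
      have hne : i ≠ p.2.2.2 := fun hh => h hh.symm
      cases hf : t.reverse.find? (fun p => p.2.2.2 == i) with
      | some v => simp [hf]
      | none => simp [List.find?, hb, PySem.Dict.get?_insert_of_ne _ _ hne]

-- membership in B's index set
theorem pv_mem_idxs (wd : List (String × Int × Int)) : ∀ (s : PySem.Set Int) (i : Int),
    (i ∈ wd.foldl (fun s p => PySem.Set.add (PySem.Set.add s (p.2.1 - 1)) (p.2.2 - 1)) s)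
      ↔ i ∈ s ∨ ∃ p ∈ wd, i = p.2.1 - 1 ∨ i = p.2.2 - 1 := by
  induction wd with
  | nil => intro s i; simp
  | cons p t ih =>
    intro s i
    simp [List.foldl, ih, PySem.Set.mem_add, or_assoc]

-- membership in B's referenced-word set after the reverse scan
theorem pv_refwords_mem (l : List (String × Int × Int × Int)) :
    ∀ (s : PySem.Set Int) (r : PySem.Set String) (x : String),
    ((x ∈ (l.foldl (fun (st : PySem.Set Int × PySem.Set String) p =>
        if PySem.Set.contains st.1 p.2.2.2 then
          (PySem.Set.discard st.1 p.2.2.2, PySem.Set.add st.2 p.1)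
        else st) (s, r)).2)
      ↔ x ∈ r ∨ ∃ i ∈ s, ((l.find? (fun p => p.2.2.2 == i)).map (·.1)) = some x) := by
  induction l with
  | nil => intro s r x; simp
  | cons p t ih =>
    intro s r x
    by_cases hc : p.2.2.2 ∈ s
    · have hcb : PySem.Set.contains s p.2.2.2 = true := by
        simpa [PySem.Set.contains_iff] using hc
      simp only [List.foldl, hcb, if_pos]
      rw [ih]
      constructor
      · rintro (h | h)
        · rcases (by simpa [PySem.Set.mem_add] using h : x ∈ r ∨ x = p.1) with h | h
          · exact Or.inl h
          · exact Or.inr ⟨p.2.2.2, hc, by simp [List.find?, h]⟩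
        · rcases h with ⟨i, hi, hfind⟩
          have hi' : i ∈ s ∧ i ≠ p.2.2.2 := by simpa [PySem.Set.mem_discard] using hi
          refine Or.inr ⟨i, hi'.1, ?_⟩
          have hb : (p.2.2.2 == i) = false := by simp [Ne.symm hi'.2]
          simp [List.find?, hb, hfind]
      · rintro (h | ⟨i, hi, hfind⟩)
        · exact Or.inl (by simp [PySem.Set.mem_add, h])
        · by_cases hip : i = p.2.2.2
          · subst hip
            have hx : x = p.1 := by
              simp [List.find?] at hfind; exact hfind.symm
            exact Or.inl (by simp [PySem.Set.mem_add, hx])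
          · have hb : (p.2.2.2 == i) = false := by simp [Ne.symm hip]
            refine Or.inr ⟨i, by simp [PySem.Set.mem_discard, hi, hip], ?_⟩
            simpa [List.find?, hb] using hfind
    · have hcb : PySem.Set.contains s p.2.2.2 = false := by
        simp [hc]
      simp only [List.foldl, hcb, Bool.false_eq_true, if_neg, not_false_iff]
      rw [ih]
      constructor
      · rintro (h | ⟨i, hi, hfind⟩)
        · exact Or.inl h
        · have hb : (p.2.2.2 == i) = false := by
            simp only [beq_eq_false_iff_ne, ne_eq]; intro hh; exact hc (hh ▸ hi)
          exact Or.inr ⟨i, hi, by simp [List.find?, hb, hfind]⟩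
      · rintro (h | ⟨i, hi, hfind⟩)
        · exact Or.inl h
        · have hb : (p.2.2.2 == i) = false := by
            simp only [beq_eq_false_iff_ne, ne_eq]; intro hh; exact hc (hh ▸ hi)
          exact Or.inr ⟨i, hi, by simpa [List.find?, hb] using hfind⟩

-- split() never yields the empty word
theorem pv_go_ne_nil (s : List Char) : ∀ (cur : List Char) (acc : List (List Char)),
    (∀ w ∈ acc, w ≠ []) → ∀ w ∈ PySem.Chars.split₀.go s cur acc, w ≠ [] := by
  induction s with
  | nil =>
    intro cur acc hacc w hw
    by_cases h : cur = []
    · rw [PySem.Chars.split₀.go] at hw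
      simp only [h, List.isEmpty_nil, if_pos, List.mem_reverse] at hw
      exact hacc _ hw
    · rw [PySem.Chars.split₀.go] at hw
      simp only [List.isEmpty_iff, h, if_neg, not_false_iff, List.mem_reverse, List.mem_cons] at hw
      rcases hw with h1 | h1
      · simp [h1, h]
      · exact hacc _ h1
  | cons c rest ih =>
    intro cur acc hacc w hw
    rw [PySem.Chars.split₀.go] at hw
    by_cases hws : PySem.Chars.isspace c = true
    · simp only [hws, if_pos] at hw
      by_cases h : cur = []
      · simp only [h, List.isEmpty_nil, if_pos] at hw
        exact ih [] acc hacc w hw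
      · simp only [List.isEmpty_iff, h, if_neg, not_false_iff] at hw
        refine ih [] _ ?_ w hw
        intro v hv
        rcases List.mem_cons.mp hv with h1 | h1
        · simp [h1, h]
        · exact hacc _ h1
    · simp only [hws, Bool.false_eq_true, if_neg, not_false_iff] at hw
      exact ih (c :: cur) acc hacc w hw

theorem pv_empty_not_mem_split₀ (s : String) : "" ∉ PySem.Str.split₀ s := by
  intro h
  rcases (by simpa [PySem.Str.split₀] using h :
      ∃ w ∈ PySem.Chars.split₀ s.toList, String.ofList w = "") with ⟨w, hw, hofl⟩
  apply pv_go_ne_nil s.toList [] [] (by simp) w hw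
  have := congrArg String.toList hofl
  simpa using this

-- contains-form of pv_refwords_mem (matches the goal before contains is unfolded)
theorem pv_refwords_contains (l : List (String × Int × Int × Int))
    (s : PySem.Set Int) (r : PySem.Set String) (x : String) :
    (PySem.Set.contains (l.foldl (fun (st : PySem.Set Int × PySem.Set String) p =>
        if PySem.Set.contains st.1 p.2.2.2 then
          (PySem.Set.discard st.1 p.2.2.2, PySem.Set.add st.2 p.1)
        else st) (s, r)).2 x = true)
      ↔ x ∈ r ∨ ∃ i ∈ s, ((l.find? (fun p => p.2.2.2 == i)).map (·.1)) = some x := by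
  rw [PySem.Set.contains_iff]
  exact pv_refwords_mem l s r x

-- ===== VERDICT =====
theorem has_intersection_spec : Claim_equal_has_intersection := by
  intro tweet_data word_dep keywords _hDom _hPre
  unfold Spec_has_intersection has_intersection has_intersection_alt
  simp only [pv_wd_eq, pv_kwords_eq, List.nil_append]
  rw [Bool.eq_iff_iff]
  simp only [Bool.not_eq_eq_eq_not, Bool.not_true, List.isEmpty_eq_false_iff_exists_mem,
    PySem.Set.mem_inter, PySem.Set.mem_ofList, List.any_eq_true, List.mem_flatMap,
    List.mem_cons, List.not_mem_nil, or_false, pv_refwords_contains, pv_mem_idxs,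
    PySem.Set.empty, false_or]
  constructor
  · rintro ⟨x, ⟨p, hp, hx⟩, doc, hdoc, phrase, hph, hxw⟩
    have hiw : ∃ i, (∃ q ∈ word_dep, i = q.2.1 - 1 ∨ i = q.2.2 - 1) ∧
        PySem.Dict.getD (tweet_data.foldl (fun d p => PySem.Dict.insert d p.2.2.2 p.1) PySem.Dict.empty) i "" = x := by
      rcases hx with h | h
      · exact ⟨p.2.1 - 1, ⟨p, hp, Or.inl rfl⟩, h.symm⟩
      · exact ⟨p.2.2 - 1, ⟨p, hp, Or.inr rfl⟩, h.symm⟩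
    rcases hiw with ⟨i, hiref, hget⟩
    rw [PySem.Dict.getD_eq_get?_getD, pv_tokens_get?] at hget
    cases hf : tweet_data.reverse.find? (fun p => p.2.2.2 == i) with
    | none =>
      exfalso
      rw [hf] at hget
      have hxe : x = "" := by simpa [PySem.Dict.empty, PySem.Dict.get?] using hget.symm
      exact pv_empty_not_mem_split₀ phrase (hxe ▸ hxw)
    | some q =>
      refine ⟨doc, hdoc, phrase, hph, x, hxw, i, hiref, ?_⟩
      rw [hf] at hget
      simp only [Option.map_some, Option.some_or, Option.getD_some] at hget
      simp [hf, hget]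
  · rintro ⟨doc, hdoc, phrase, hph, x, hxw, i, hiref, hfind⟩
    have hget : PySem.Dict.getD (tweet_data.foldl (fun d p => PySem.Dict.insert d p.2.2.2 p.1) PySem.Dict.empty) i "" = x := by
      rw [PySem.Dict.getD_eq_get?_getD, pv_tokens_get?]
      cases hf : tweet_data.reverse.find? (fun p => p.2.2.2 == i) with
      | none => rw [hf] at hfind; simp at hfind
      | some q =>
        rw [hf] at hfind
        simp only [Option.map_some, Option.some.injEq] at hfind
        simp [hfind]
    rcases hiref with ⟨q, hq, hcase⟩
    refine ⟨x, ⟨q, hq, ?_⟩, doc, hdoc, phrase, hph, hxw⟩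
    rcases hcase with h | h <;> [left; right] <;> rw [← hget, h]
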